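-- pv_equiv track=rewrite | github.com/NadiaCorrea/RecuperacionPython | ejerciciosRecuperacion/Ejer8SeguridadSocial.py | compararB
-- ===== SOURCE A (Python) =====
-- def compararB(cadena):
--     result = False
--     num = 0
--     otros = 0
--
--     for i in cadena:
--         if (ord(i) >=48) and (ord(i) <= 57):
--             num = num + 1
--         else:
--             otros = otros + 1
--
--     if num >= 2 and otros == 0:
--         result = True
--     return result
-- ===== SOURCE B (Python) =====
-- import re
--
-- _PAT = re.compile(r'[0-9]{2,}')
--
-- def compararB(cadena):
--     return bool(_PAT.fullmatch(cadena))
-- ===== Notes on version B (the rewrite author's own statement) =====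
-- stated objective: idiomatic
-- what changed: Replaced the character-counting loop with two counters by a single regular-expression full match of [0-9]{2,} (two-or-more ASCII digits and nothing else).
import Mathlib
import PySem

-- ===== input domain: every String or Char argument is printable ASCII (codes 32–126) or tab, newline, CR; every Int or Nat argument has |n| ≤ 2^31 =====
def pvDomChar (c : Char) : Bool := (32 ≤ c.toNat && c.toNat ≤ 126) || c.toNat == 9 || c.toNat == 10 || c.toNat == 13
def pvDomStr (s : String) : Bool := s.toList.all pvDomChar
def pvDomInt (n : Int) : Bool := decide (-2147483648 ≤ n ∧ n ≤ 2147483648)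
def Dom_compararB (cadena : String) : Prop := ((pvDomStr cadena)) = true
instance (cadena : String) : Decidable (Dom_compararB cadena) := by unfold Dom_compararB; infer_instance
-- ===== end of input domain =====

-- B replaces A's counting loop (num/otros counters) with a fullmatch of the regex [0-9]{2,}: all chars ASCII digits and length >= 2.
-- ===== PORT A =====
def compararB (cadena : String) : Bool :=
  let st := cadena.toList.foldl
    (fun (p : Int × Int) i =>
      if 48 ≤ (i.toNat : Int) ∧ (i.toNat : Int) ≤ 57 then (p.1 + 1, p.2) else (p.1, p.2 + 1))
    ((0 : Int), (0 : Int))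
  if st.1 ≥ 2 ∧ st.2 = 0 then true else false

-- ===== PORT B =====
-- fullmatch of [0-9]{2,}: every character is an ASCII digit and there are at least two of them
def compararB_alt (cadena : String) : Bool :=
  cadena.toList.all (fun c => 48 ≤ c.toNat && c.toNat ≤ 57) && cadena.toList.length ≥ 2

-- ===== PRECONDITION & SPEC =====
def Spec_compararB (cadena : String) (out : Bool) : Prop := out = compararB_alt cadena
instance (cadena : String) (out : Bool) : Decidable (Spec_compararB cadena out) := by unfold Spec_compararB; infer_instance

-- ===== CLAIM (what is proved, stated in full; the proofs are below) =====
def Claim_equal_compararB : Prop := ∀ (cadena : String), Dom_compararB cadena → Spec_compararB cadena (compararB cadena)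

-- ===== LEMMAS AND PROOFS =====
def isDig (c : Char) : Bool := 48 ≤ c.toNat && c.toNat ≤ 57

-- A's fold counts digits and non-digits starting from (a, b).
theorem fold_state (l : List Char) (a b : Int) :
    (l.foldl (fun (p : Int × Int) i =>
      if 48 ≤ (i.toNat : Int) ∧ (i.toNat : Int) ≤ 57 then (p.1 + 1, p.2) else (p.1, p.2 + 1))
      (a, b))
    = (a + (l.countP isDig : Int), b + (l.countP (fun c => ! isDig c) : Int)) := by
  induction l generalizing a b with
  | nil => simp
  | cons c t ih =>
    simp only [List.foldl_cons]
    by_cases h : 48 ≤ (c.toNat : Int) ∧ (c.toNat : Int) ≤ 57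
    · have hb : isDig c = true := by
        simp only [isDig, Bool.and_eq_true, decide_eq_true_eq]; omega
      rw [if_pos h, ih, List.countP_cons, List.countP_cons, hb]
      simp; ring
    · have hb : isDig c = false := by
        simp only [isDig, Bool.and_eq_false_iff, decide_eq_false_iff_not]; omega
      rw [if_neg h, ih, List.countP_cons, List.countP_cons, hb]
      simp; ring

-- ===== VERDICT (by name: the statement is the Claim_ definition above) =====
theorem compararB_spec : Claim_equal_compararB := by
  intro cadena _
  unfold Spec_compararB compararB compararB_alt
  simp only [fold_state, zero_add]
  have hall : cadena.toList.all (fun c => 48 ≤ c.toNat && c.toNat ≤ 57)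
      = cadena.toList.all isDig := rfl
  rw [hall]
  by_cases hA : cadena.toList.all isDig = true
  · have h1 : cadena.toList.countP isDig = cadena.toList.length :=
      List.countP_eq_length.mpr (List.all_eq_true.mp hA)
    have h2 : cadena.toList.countP (fun c => ! isDig c) = 0 := by
      rw [List.countP_eq_zero]
      intro c hc
      simp [List.all_eq_true.mp hA c hc]
    rw [h1, h2]
    simp only [hA, Bool.true_and]
    by_cases hl : cadena.toList.length ≥ 2
    · rw [if_pos ⟨by exact_mod_cast hl, rfl⟩]
      have : cadena.toList.length = cadena.length := String.length_toList
      simp; omega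
    · rw [if_neg]
      · have : cadena.toList.length = cadena.length := String.length_toList
        simp; omega
      · intro ⟨h, _⟩; omega
  · have h2 : 0 < cadena.toList.countP (fun c => ! isDig c) := by
      rw [List.countP_pos_iff]
      obtain ⟨c, hc, hnc⟩ := by
        simpa [List.all_eq_true] using hA
      exact ⟨c, hc, by simp [hnc]⟩
    rw [if_neg]
    · simp [hA]
    · intro ⟨_, h⟩; omega
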